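-- pv_equiv track=rewrite | github.com/sanchez-lucas/advent-of-code | 2025/day03/day03-part2.py | get_highest_jolt
-- ===== SOURCE A (Python) =====
-- def get_highest_jolt(bank: list[int], jolt_size: int) -> int:
--   if jolt_size == 0 or len(bank) == 0:
--     return 0
--   if jolt_size == 1:
--     return max(bank)
--   highest_number = max(bank[:-(jolt_size - 1)])
--   highest_number_index = bank.index(highest_number)
--   return highest_number * (10 ** (jolt_size - 1)) + get_highest_jolt(bank[highest_number_index + 1:], jolt_size - 1)
-- ===== SOURCE B (Python) =====
-- def get_highest_jolt(bank: list[int], jolt_size: int) -> int: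
--   # Monotonic stack: keep the lexicographically largest length-k subsequence in one pass.
--   if jolt_size == 0 or len(bank) == 0:
--     return 0
--   if not 0 <= jolt_size <= len(bank):
--     raise ValueError("jolt_size must be between 0 and len(bank)")
--   drops = len(bank) - jolt_size
--   stack = []
--   for x in bank:
--     while stack and drops > 0 and stack[-1] < x:
--       stack.pop()
--       drops -= 1
--     stack.append(x)
--   result = 0
--   for d in stack[:jolt_size]:
--     result = result * 10 + d
--   return result
-- ===== Notes on version B (the rewrite author's own statement) =====
-- stated objective: faster
-- what changed: Replaced the recursive greedy (max over a shrinking prefix + list.index rescan + slicing at every step) by a one-pass monotonic-stack selection of the lexicographically largest length-k subsequence, followed by a single weighted fold.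
-- outside the precondition, e.g. on get_highest_jolt([1, 2], -1): A returns 0.02, B raises ValueError
import Mathlib
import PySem

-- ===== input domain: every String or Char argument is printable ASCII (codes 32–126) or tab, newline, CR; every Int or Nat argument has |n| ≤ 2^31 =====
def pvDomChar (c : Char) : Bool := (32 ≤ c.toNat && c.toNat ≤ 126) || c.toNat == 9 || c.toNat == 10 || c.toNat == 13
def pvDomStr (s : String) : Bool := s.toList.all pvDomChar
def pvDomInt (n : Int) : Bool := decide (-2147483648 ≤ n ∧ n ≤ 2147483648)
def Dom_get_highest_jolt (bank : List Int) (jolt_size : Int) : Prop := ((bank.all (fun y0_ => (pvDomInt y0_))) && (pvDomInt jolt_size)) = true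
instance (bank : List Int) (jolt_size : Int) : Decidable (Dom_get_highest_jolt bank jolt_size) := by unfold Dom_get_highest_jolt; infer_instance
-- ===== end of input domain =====

-- B replaces A's recursive greedy (max over a shrinking prefix + index rescan + slicing per step,
-- O(n*k)) by a one-pass monotonic-stack selection of the same length-k subsequence (O(n)).

-- ===== PORT A =====
-- literal transliteration of A; where Python raises (max of an empty slice) the match
-- returns 0 — those inputs are excluded by Pre_get_highest_jolt.
-- 10 ** (jolt_size - 1) is ported with .toNat: exact for jolt_size ≥ 1 (for jolt_size < 0
-- with a nonempty bank Python produces a float, excluded by Pre_get_highest_jolt).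
def get_highest_jolt (bank : List Int) (jolt_size : Int) : Int :=
  if jolt_size = 0 ∨ bank.length = 0 then 0
  else if jolt_size = 1 then (PySem.List.max? bank (fun y => y)).getD 0
  else
    match PySem.List.max? (PySem.List.slice bank none (some (-(jolt_size - 1)))) (fun y => y) with
    | none => 0   -- Python: ValueError (max of empty sequence); outside Pre_
    | some highest_number =>
      match h : PySem.List.index? bank highest_number with
      | none => 0  -- unreachable: highest_number ∈ bank
      | some i =>
        highest_number * 10 ^ (jolt_size - 1).toNat
          + get_highest_jolt (PySem.List.slice bank (some ((i : Int) + 1)) none) (jolt_size - 1)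
termination_by bank.length
decreasing_by
  obtain ⟨pre, suf, hxs, -, -⟩ := (PySem.List.index?_eq_some_iff _ _ _).1 h
  have hs : PySem.List.slice bank (some ((i : Int) + 1)) none = bank.drop (i + 1) := by
    rw [PySem.List.slice_from bank (a := (i : Int) + 1) (by positivity)]
    congr 1
  rw [hs]
  have hlb : 0 < bank.length := by rw [hxs]; simp
  simp [List.length_drop]
  omega

-- ===== PORT B =====
-- Source B's stack is kept head-= top (Python's end of list); stack[:jolt_size] becomes
-- take jolt_size.toNat of the reversed stack (exact: the guard gives jolt_size > 0).
def jPopLoop (stack : List Int) (drops : Int) (x : Int) : List Int × Int :=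
  match stack with
  | [] => ([], drops)
  | t :: rest => if 0 < drops ∧ t < x then jPopLoop rest (drops - 1) x else (t :: rest, drops)

def jStep (s : List Int × Int) (x : Int) : List Int × Int :=
  let p := jPopLoop s.1 s.2 x
  (x :: p.1, p.2)

def get_highest_jolt_alt (bank : List Int) (jolt_size : Int) : Int :=
  if jolt_size = 0 ∨ bank.length = 0 then 0
  else if ¬(0 ≤ jolt_size ∧ jolt_size ≤ bank.length) then 0
    -- Python: raise ValueError (jolt_size out of range); outside Pre_
  else
    let st := (bank.foldl jStep (([] : List Int), (bank.length : Int) - jolt_size)).1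
    (st.reverse.take jolt_size.toNat).foldl (fun r d => r * 10 + d) 0

-- ===== PRECONDITION & SPEC =====
-- Pre_ excludes the inputs (nonempty bank, jolt_size > len(bank)) on which A raises
-- ValueError, and (nonempty bank, jolt_size < 0) on which A returns a float, not an int.
def Pre_get_highest_jolt (bank : List Int) (jolt_size : Int) : Prop :=
  bank = [] ∨ (0 ≤ jolt_size ∧ jolt_size ≤ bank.length)
instance (bank : List Int) (jolt_size : Int) : Decidable (Pre_get_highest_jolt bank jolt_size) := by
  unfold Pre_get_highest_jolt; infer_instance

def pvWitness_get_highest_jolt : List Int × Int := ([3, 1, 4, 1, 5, 9, 2], 3)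

def Spec_get_highest_jolt (bank : List Int) (jolt_size : Int) (out : Int) : Prop := out = get_highest_jolt_alt bank jolt_size
instance (bank : List Int) (jolt_size : Int) (out : Int) : Decidable (Spec_get_highest_jolt bank jolt_size out) := by unfold Spec_get_highest_jolt; infer_instance

-- ===== CLAIM (what is proved, stated in full; the proofs are below) =====
def Claim_equal_get_highest_jolt : Prop := ∀ (bank : List Int) (jolt_size : Int), Dom_get_highest_jolt bank jolt_size → Pre_get_highest_jolt bank jolt_size → Spec_get_highest_jolt bank jolt_size (get_highest_jolt bank jolt_size)

-- ===== LEMMAS AND PROOFS =====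

-- the greedy-chosen subsequence (the list of picked numbers), recursion on k
def jG (xs : List Int) : Nat → List Int
  | 0 => []
  | (k+1) =>
    match PySem.List.max? (xs.take (xs.length - k)) (fun y => y) with
    | none => []
    | some m =>
      match PySem.List.index? xs m with
      | none => []
      | some i => m :: jG (xs.drop (i + 1)) k

def jWeight (l : List Int) : Int := l.foldl (fun r d => r * 10 + d) 0

theorem jWeight_shift (t : List Int) (r : Int) :
    t.foldl (fun r d => r * 10 + d) r = r * 10 ^ t.length + jWeight t := by
  induction t generalizing r with
  | nil => simp [jWeight]
  | cons x t ih =>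
    simp only [List.foldl_cons, jWeight, List.length_cons]
    rw [ih (r * 10 + x), ih (0 * 10 + x)]
    ring

-- window facts: for k < n, the data the greedy step produces
theorem jWindow (xs : List Int) (k : Nat) (hk : k < xs.length) :
    ∃ m i pre suf,
      PySem.List.max? (xs.take (xs.length - k)) (fun y => y) = some m ∧
      PySem.List.index? xs m = some i ∧
      xs = pre ++ m :: suf ∧ pre.length = i ∧ i + k < xs.length ∧
      (∀ y ∈ pre, y < m) ∧
      (∀ (j : Nat) (hj : j < suf.length), i + 1 + j < xs.length - k → suf[j] ≤ m) ∧
      xs.drop (i + 1) = suf := by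
  set w := xs.take (xs.length - k) with hw
  have hwlen : w.length = xs.length - k := by
    simp [hw]
  have hwne : w ≠ [] := List.ne_nil_of_length_pos (by rw [hwlen]; omega)
  obtain ⟨m, hm⟩ : ∃ m, PySem.List.max? w (fun y => y) = some m := by
    cases hmx : PySem.List.max? w (fun y => y) with
    | none => exact absurd ((PySem.List.max?_eq_none_iff _ _).1 hmx) hwne
    | some m => exact ⟨m, rfl⟩
  have hmemw : m ∈ w := PySem.List.max?_mem hm
  have hmax : ∀ y ∈ w, y ≤ m := fun y hy => PySem.List.max?_isMax hm y hy
  have hmemxs : m ∈ xs := List.mem_of_mem_take hmemw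
  -- first index in xs is the first index in w
  have hxs_split : xs = w ++ xs.drop (xs.length - k) := by
    simp [hw]
  have hidx_eq : PySem.List.index? xs m = PySem.List.index? w m := by
    conv_lhs => rw [hxs_split]
    exact PySem.List.index?_append_of_mem _ hmemw
  obtain ⟨i, hi⟩ : ∃ i, PySem.List.index? xs m = some i := by
    cases hix : PySem.List.index? xs m with
    | none => exact absurd hmemxs ((PySem.List.index?_eq_none_iff _ _).1 hix)
    | some i => exact ⟨i, rfl⟩
  obtain ⟨pre, suf, hsplit, hprelen, hnotpre⟩ := (PySem.List.index?_eq_some_iff _ _ _).1 hi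
  have hiw : PySem.List.index? w m = some i := by rw [← hidx_eq]; exact hi
  obtain ⟨pw, sw, hwsplit, hpwlen, -⟩ := (PySem.List.index?_eq_some_iff _ _ _).1 hiw
  have hiwlt : i < w.length := by rw [hwsplit]; simp; omega
  have hik : i + k < xs.length := by omega
  -- pre = take i xs is a prefix of w
  have hpre_take : pre = xs.take i := by
    rw [hsplit]; simp [hprelen]
  have hpre_sub : ∀ y ∈ pre, y ∈ w := by
    intro y hy
    rw [hpre_take] at hy
    rw [hw]
    have : xs.take i = (xs.take (xs.length - k)).take i := by
      rw [List.take_take]; congr 1; omega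
    rw [this] at hy
    exact List.mem_of_mem_take hy
  have hpre_lt : ∀ y ∈ pre, y < m := by
    intro y hy
    rcases lt_or_eq_of_le (hmax y (hpre_sub y hy)) with h | h
    · exact h
    · exact absurd (h ▸ hy) hnotpre
  have hsuf_le : ∀ (j : Nat) (hj : j < suf.length), i + 1 + j < xs.length - k → suf[j] ≤ m := by
    intro j hj hjk
    have hlt : i + 1 + j < xs.length := by omega
    have h1 : xs[i + 1 + j]? = some suf[j] := by
      rw [hsplit, List.getElem?_append_right (by omega)]
      have hc : i + 1 + j - pre.length = j + 1 := by omega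
      rw [hc, List.getElem?_cons_succ, List.getElem?_eq_getElem hj]
    have h2 : w[i + 1 + j]? = xs[i + 1 + j]? := by
      rw [hw]
      exact List.getElem?_take_of_lt (by omega)
    have h3 : w[i + 1 + j]? = some suf[j] := h2.trans h1
    have hmem : suf[j] ∈ w := List.mem_of_getElem? h3
    exact hmax _ hmem
  have hdrop : xs.drop (i + 1) = suf := by
    rw [hsplit]
    have : pre ++ m :: suf = (pre ++ [m]) ++ suf := by simp
    rw [this]
    have hl : (pre ++ [m]).length = i + 1 := by simp [hprelen]
    rw [← hl, List.drop_left]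
  exact ⟨m, i, pre, suf, hm, hi, hsplit, hprelen, hik, hpre_lt, hsuf_le, hdrop⟩

theorem jG_length : ∀ (k : Nat) (xs : List Int), k ≤ xs.length → (jG xs k).length = k := by
  intro k
  induction k with
  | zero => intro xs _; simp [jG]
  | succ k ih =>
    intro xs hk
    obtain ⟨m, i, pre, suf, hm, hi, hsplit, hprelen, hik, -, -, hdrop⟩ :=
      jWindow xs k (by omega)
    simp only [jG, hm, hi, hdrop]
    have hsuflen : suf.length = xs.length - i - 1 := by
      rw [hsplit] at hk ⊢; simp at hk ⊢; omega
    simp [ih suf (by omega)]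

-- ===== A side: port A computes jWeight (jG xs k) =====
theorem jA_eq : ∀ (k : Nat) (xs : List Int), 1 ≤ k → k ≤ xs.length →
    get_highest_jolt xs (k : Int) = jWeight (jG xs k) := by
  intro k
  induction k with
  | zero => omega
  | succ k ih =>
    intro xs _ hk
    have hxs : xs.length ≠ 0 := by omega
    obtain ⟨m, i, pre, suf, hm, hi, hsplit, hprelen, hik, -, -, hdrop⟩ :=
      jWindow xs k (by omega)
    by_cases hk1 : k = 0
    · -- jolt_size = 1
      subst hk1
      have hmx : PySem.List.max? xs (fun y => y) = some m := by
        simpa using hm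
      have hc : ((0 + 1 : Nat) : Int) = 1 := by norm_num
      rw [hc, get_highest_jolt]
      rw [if_neg (by simp [hxs] : ¬((1 : Int) = 0 ∨ xs.length = 0)), if_pos rfl, hmx]
      simp only [jG, Nat.sub_zero, List.take_length, hmx, hi]
      simp [jWeight]
    · -- jolt_size ≥ 2
      have hslice : PySem.List.slice xs none (some (-((k : Int) + 1 - 1))) = xs.take (xs.length - k) := by
        have := PySem.List.slice_to_neg_natCast xs (k := k) (by omega)
        simpa using this
      rw [get_highest_jolt]
      have hne0 : ¬((k : Int) + 1 = 0 ∨ xs.length = 0) := by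
        omega
      have hne1 : ¬((k : Int) + 1 = 1) := by omega
      simp only [Nat.cast_succ, hne0, if_false, hne1, hslice, hm]
      have hrec : PySem.List.slice xs (some ((i : Int) + 1)) none = suf := by
        have := PySem.List.slice_from xs (a := (i : Int) + 1) (by positivity)
        rw [this]
        have : ((i : Int) + 1).toNat = i + 1 := by omega
        rw [this, hdrop]
      have hsuflen : suf.length = xs.length - i - 1 := by
        rw [hsplit]; simp; omega
      have hkint : (k : Int) + 1 - 1 = ((k : Nat) : Int) := by omega
      split
      next heq => rw [hi] at heq; exact absurd heq (by simp)
      next i' heq =>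
        rw [hi] at heq
        injection heq with heq
        subst heq
        rw [hrec, hkint, ih suf (by omega) (by omega)]
        simp only [jG, hm, hi, hdrop, jWeight, List.foldl_cons]
        rw [jWeight_shift (jG suf k) (0 * 10 + m), jG_length k suf (by omega)]
        simp [jWeight]

-- ===== B side: the stack run =====
theorem jPopLoop_spec : ∀ (st : List Int) (d x : Int),
    (jPopLoop st d x).2 ≤ d ∧
    (((jPopLoop st d x).1.length : Int) = st.length - (d - (jPopLoop st d x).2)) ∧
    (∀ y ∈ (jPopLoop st d x).1, y ∈ st) := by
  intro st
  induction st with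
  | nil => intro d x; simp [jPopLoop]
  | cons t rest ih =>
    intro d x
    by_cases h : 0 < d ∧ t < x
    · obtain ⟨h1, h2, h3⟩ := ih (d - 1) x
      simp only [jPopLoop]
      rw [if_pos h]
      refine ⟨by omega, by simp only [List.length_cons]; push_cast at h2 ⊢; omega, ?_⟩
      intro y hy
      exact List.mem_cons_of_mem _ (h3 y hy)
    · simp [jPopLoop, h]

theorem jPopLoop_all_lt : ∀ (st : List Int) (d x : Int),
    (∀ y ∈ st, y < x) → (st.length : Int) ≤ d → jPopLoop st d x = ([], d - st.length) := by
  intro st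
  induction st with
  | nil => intro d x _ _; simp [jPopLoop]
  | cons t rest ih =>
    intro d x hlt hd
    simp only [List.length_cons] at hd
    have hc : 0 < d ∧ t < x := ⟨by push_cast at hd; omega, hlt t (by simp)⟩
    simp only [jPopLoop]
    rw [if_pos hc, ih (d - 1) x (fun y hy => hlt y (by simp [hy])) (by push_cast at hd ⊢; omega)]
    simp only [Prod.mk.injEq, List.length_cons]
    refine ⟨by simp, ?_⟩
    push_cast
    omega

theorem jPopLoop_append : ∀ (st ys : List Int) (d x : Int),
    jPopLoop (st ++ ys) d x =
      if (jPopLoop st d x).1 = [] then jPopLoop ys (jPopLoop st d x).2 x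
      else ((jPopLoop st d x).1 ++ ys, (jPopLoop st d x).2) := by
  intro st
  induction st with
  | nil => intro ys d x; simp [jPopLoop]
  | cons t rest ih =>
    intro ys d x
    by_cases h : 0 < d ∧ t < x
    · simp only [List.cons_append, jPopLoop]
      rw [if_pos h, if_pos h]
      exact ih ys (d - 1) x
    · simp [jPopLoop, h]

theorem jRun_spec : ∀ (xs : List Int) (st : List Int) (d : Int),
    (xs.foldl jStep (st, d)).2 ≤ d ∧
    (((xs.foldl jStep (st, d)).1.length : Int)
        = st.length + xs.length - (d - (xs.foldl jStep (st, d)).2)) ∧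
    (∀ y ∈ (xs.foldl jStep (st, d)).1, y ∈ st ∨ y ∈ xs) := by
  intro xs
  induction xs with
  | nil => intro st d; simp
  | cons x xs ih =>
    intro st d
    obtain ⟨p1, p2, p3⟩ := jPopLoop_spec st d x
    obtain ⟨r1, r2, r3⟩ := ih (x :: (jPopLoop st d x).1) (jPopLoop st d x).2
    simp only [List.foldl_cons]
    have hstep : jStep (st, d) x = (x :: (jPopLoop st d x).1, (jPopLoop st d x).2) := rfl
    rw [hstep]
    refine ⟨by omega, by simp at r2 ⊢; omega, ?_⟩
    intro y hy
    rcases r3 y hy with h | h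
    · rcases List.mem_cons.1 h with h1 | h1
      · subst h1; simp
      · exact Or.inl (p3 y h1)
    · simp [h]

-- bottom protection: if no element that could ever reach m exceeds it, m stays at the bottom
theorem jRun_protect : ∀ (xs st : List Int) (d m : Int),
    (∀ (j : Nat) (hj : j < xs.length), ((st.length : Int) + j < d) → xs[j] ≤ m) →
    xs.foldl jStep (st ++ [m], d)
      = ((xs.foldl jStep (st, d)).1 ++ [m], (xs.foldl jStep (st, d)).2) := by
  intro xs
  induction xs with
  | nil => intro st d m _; simp
  | cons x xs ih =>
    intro st d m H
    obtain ⟨p1, p2, -⟩ := jPopLoop_spec st d x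
    simp only [List.foldl_cons]
    have hpop : jPopLoop (st ++ [m]) d x = ((jPopLoop st d x).1 ++ [m], (jPopLoop st d x).2) := by
      rw [jPopLoop_append]
      by_cases he : (jPopLoop st d x).1 = []
      · rw [if_pos he, he]
        have hcond : ¬(0 < (jPopLoop st d x).2 ∧ m < x) := by
          rintro ⟨hd', hmx⟩
          have hst : (st.length : Int) = d - (jPopLoop st d x).2 := by
            rw [he] at p2; simp at p2; omega
          have hx0 : (st.length : Int) + ((0 : Nat) : Int) < d := by push_cast; omega
          have hxm := H 0 (by simp) hx0
          simp at hxm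
          omega
        simp [jPopLoop, hcond]
      · rw [if_neg he]
    have hstep1 : jStep (st ++ [m], d) x
        = ((x :: (jPopLoop st d x).1) ++ [m], (jPopLoop st d x).2) := by
      simp [jStep, hpop]
    have hstep2 : jStep (st, d) x = (x :: (jPopLoop st d x).1, (jPopLoop st d x).2) := rfl
    rw [hstep1, hstep2]
    apply ih
    intro j hj hjd
    have hp2 := p2
    have := H (j + 1) (by simpa using Nat.succ_lt_succ hj)
      (by simp only [List.length_cons] at hjd; push_cast at hjd hp2 ⊢; omega)
    simpa using this

-- clearing the prefix before the chosen maximum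
theorem jRun_clear : ∀ (pre : List Int) (d m : Int),
    (∀ y ∈ pre, y < m) → (pre.length : Int) ≤ d →
    (pre ++ [m]).foldl jStep ([], d) = ([m], d - pre.length) := by
  intro pre d m hlt hd
  rw [List.foldl_append]
  obtain ⟨r1, r2, r3⟩ := jRun_spec pre [] d
  set s := (pre.foldl jStep (([] : List Int), d)).1 with hs
  set dc := (pre.foldl jStep (([] : List Int), d)).2 with hdc
  have hsm : ∀ y ∈ s, y < m := by
    intro y hy
    rcases r3 y hy with h | h
    · simp at h
    · exact hlt y h
  have hslen : (s.length : Int) ≤ dc := by simp at r2; omega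
  simp only [List.foldl_cons, List.foldl_nil]
  have : (pre.foldl jStep (([] : List Int), d)) = (s, dc) := by rw [hs, hdc]
  rw [this]
  have hstep : jStep (s, dc) m = (m :: (jPopLoop s dc m).1, (jPopLoop s dc m).2) := rfl
  rw [hstep, jPopLoop_all_lt s dc m hsm hslen]
  simp at r2 ⊢; omega

-- the stack run produces the greedy subsequence
theorem jB_eq : ∀ (k : Nat) (xs : List Int), 1 ≤ k → k ≤ xs.length →
    ((xs.foldl jStep (([] : List Int), (xs.length : Int) - k)).1.reverse).take k = jG xs k := by
  intro k
  induction k with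
  | zero => omega
  | succ k ih =>
    intro xs _ hk
    obtain ⟨m, i, pre, suf, hm, hi, hsplit, hprelen, hik, hprelt, hsufle, hdrop⟩ :=
      jWindow xs k (by omega)
    have hsuflen : suf.length = xs.length - i - 1 := by
      rw [hsplit]; simp; omega
    have hre : xs = (pre ++ [m]) ++ suf := by rw [hsplit]; simp
    have hfold : List.foldl jStep (([] : List Int), (xs.length : Int) - ((k + 1 : Nat) : Int)) xs
        = List.foldl jStep (([] : List Int), (xs.length : Int) - (k : Int) - 1) ((pre ++ [m]) ++ suf) := by
      rw [← hre]
      have hc : (xs.length : Int) - ((k + 1 : Nat) : Int) = (xs.length : Int) - (k : Int) - 1 := by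
        push_cast
        omega
      rw [hc]
    rw [hfold, List.foldl_append]
    rw [jRun_clear pre ((xs.length : Int) - k - 1) m hprelt (by push_cast [hprelen]; omega)]
    have hdsuf : (xs.length : Int) - k - 1 - pre.length = (suf.length : Int) - k := by
      push_cast [hprelen, hsuflen]; omega
    rw [hdsuf]
    have hm1 : ([m] : List Int) = [] ++ [m] := by simp
    rw [hm1, jRun_protect suf [] ((suf.length : Int) - k) m ?Hbound]
    case Hbound =>
      intro j hj hjd
      apply hsufle j hj
      simp at hjd
      omega
    rw [List.reverse_append]
    simp only [List.reverse_cons, List.reverse_nil, List.nil_append, List.singleton_append,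
      List.take_succ_cons]
    simp only [jG, hm, hi, hdrop]
    by_cases hk0 : k = 0
    · subst hk0; simp [jG]
    · congr 1
      exact ih suf (by omega) (by omega)

-- small evaluation facts for the top-level case split
theorem jA_trivial (bank : List Int) (jolt_size : Int)
    (h : jolt_size = 0 ∨ bank.length = 0) : get_highest_jolt bank jolt_size = 0 := by
  rw [get_highest_jolt, if_pos h]

theorem jB_trivial (bank : List Int) (jolt_size : Int)
    (h : jolt_size = 0 ∨ bank.length = 0) : get_highest_jolt_alt bank jolt_size = 0 := by
  rw [get_highest_jolt_alt, if_pos h]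

-- ===== VERDICT (by name: the statement is the Claim_ definition above) =====
theorem get_highest_jolt_spec : Claim_equal_get_highest_jolt := by
  intro bank jolt_size _ hpre
  unfold Spec_get_highest_jolt
  rcases hpre with hnil | ⟨h0, hle⟩
  · subst hnil
    rw [jA_trivial _ _ (Or.inr rfl), jB_trivial _ _ (Or.inr rfl)]
  · by_cases hz : jolt_size = 0
    · subst hz
      rw [jA_trivial _ _ (Or.inl rfl), jB_trivial _ _ (Or.inl rfl)]
    · set k := jolt_size.toNat with hkdef
      have hkcast : jolt_size = (k : Int) := by omega
      have hk1 : 1 ≤ k := by omega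
      have hkn : k ≤ bank.length := by omega
      rw [hkcast, jA_eq k bank hk1 hkn]
      rw [get_highest_jolt_alt]
      have hng : ¬((k : Int) = 0 ∨ bank.length = 0) := by omega
      have hok : ¬¬(0 ≤ (k : Int) ∧ (k : Int) ≤ bank.length) := by push_cast; omega
      rw [if_neg hng, if_neg hok]
      have htn : ((k : Int)).toNat = k := by omega
      show jWeight (jG bank k)
          = List.foldl (fun r d => r * 10 + d) 0
              (List.take ((k : Int)).toNat
                ((List.foldl jStep (([] : List Int), (bank.length : Int) - (k : Int)) bank).1.reverse))
      rw [htn, jB_eq k bank hk1 hkn]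
      rfl
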